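-- pv_equiv track=rewrite | github.com/imba28/advent-of-code-2020 | 16/part2.py | is_valid_ticket
-- ===== SOURCE A (Python) =====
-- def is_valid_ticket(ranges, ticket):
--     for number in ticket:
--         valid = False
--         for r in ranges:
--             if r[0] <= number <= r[1]:
--                 valid = True
--                 break
--         if not valid:
--             return False
--     return True
-- ===== SOURCE B (Python) =====
-- def is_valid_ticket(ranges, ticket):
--     # Transposed traversal: start from the set of distinct ticket numbers and
--     # let each range eliminate the numbers it covers; valid iff none survive.
--     remaining = set(ticket)
--     for lo, hi in ranges:
--         remaining = {n for n in remaining if n < lo or n > hi}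
--     return not remaining
-- ===== Notes on version B (the rewrite author's own statement) =====
-- stated objective: alternative
-- what changed: Transposes the two loops: instead of scanning all ranges per ticket number with a flag and break, B starts from the set of distinct ticket numbers, lets each range filter out the numbers it covers, and returns whether the surviving set is empty.
import Mathlib
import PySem

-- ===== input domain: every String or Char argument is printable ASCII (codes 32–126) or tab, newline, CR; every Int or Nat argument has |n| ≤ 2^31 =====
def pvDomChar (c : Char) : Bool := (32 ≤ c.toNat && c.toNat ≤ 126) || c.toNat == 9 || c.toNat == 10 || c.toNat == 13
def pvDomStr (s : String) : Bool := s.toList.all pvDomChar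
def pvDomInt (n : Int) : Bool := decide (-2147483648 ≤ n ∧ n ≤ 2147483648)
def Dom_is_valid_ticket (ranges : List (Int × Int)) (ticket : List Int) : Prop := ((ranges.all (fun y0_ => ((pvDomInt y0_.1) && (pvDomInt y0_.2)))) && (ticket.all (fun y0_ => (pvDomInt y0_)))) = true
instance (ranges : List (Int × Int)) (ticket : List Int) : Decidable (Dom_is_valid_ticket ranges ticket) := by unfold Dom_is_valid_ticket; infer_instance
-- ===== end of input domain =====

-- B transposes A's two loops: each range filters the covered numbers out of the set of
-- distinct ticket numbers; the ticket is valid iff no number survives (alternative, not faster).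

-- ===== PORT A =====
-- inner 'for r in ranges: … break' loop with its 'valid' flag: first range hit wins
def pvRangeScanA (ranges : List (Int × Int)) (number : Int) : Bool :=
  match ranges with
  | [] => false
  | r :: rs => if r.1 ≤ number ∧ number ≤ r.2 then true else pvRangeScanA rs number

def is_valid_ticket (ranges : List (Int × Int)) (ticket : List Int) : Bool :=
  match ticket with
  | [] => true
  | number :: rest =>
      if !(pvRangeScanA ranges number) then false else is_valid_ticket ranges rest

-- ===== PORT B =====
def is_valid_ticket_alt (ranges : List (Int × Int)) (ticket : List Int) : Bool :=
  let remaining : PySem.Set Int := PySem.Set.ofList ticket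
  let remaining := ranges.foldl
    (fun (rem : PySem.Set Int) (r : Int × Int) =>
      rem.filter (fun n => decide (n < r.1) || decide (r.2 < n))) remaining
  remaining.isEmpty

-- ===== PRECONDITION & SPEC =====
def Spec_is_valid_ticket (ranges : List (Int × Int)) (ticket : List Int) (out : Bool) : Prop := out = is_valid_ticket_alt ranges ticket
instance (ranges : List (Int × Int)) (ticket : List Int) (out : Bool) : Decidable (Spec_is_valid_ticket ranges ticket out) := by unfold Spec_is_valid_ticket; infer_instance

-- ===== CLAIM (what is proved, stated in full; the proofs are below) =====
def Claim_equal_is_valid_ticket : Prop := ∀ (ranges : List (Int × Int)) (ticket : List Int), Dom_is_valid_ticket ranges ticket → Spec_is_valid_ticket ranges ticket (is_valid_ticket ranges ticket)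

-- ===== LEMMAS AND PROOFS =====
theorem pvRangeScanA_iff (ranges : List (Int × Int)) (n : Int) :
    pvRangeScanA ranges n = true ↔ ∃ r ∈ ranges, r.1 ≤ n ∧ n ≤ r.2 := by
  induction ranges with
  | nil => simp [pvRangeScanA]
  | cons r rs ih =>
      simp only [pvRangeScanA]
      split_ifs with h
      · simp [h]
      · simp [ih, h]

theorem is_valid_ticket_iff (ranges : List (Int × Int)) (ticket : List Int) :
    is_valid_ticket ranges ticket = true ↔
      ∀ n ∈ ticket, ∃ r ∈ ranges, r.1 ≤ n ∧ n ≤ r.2 := by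
  induction ticket with
  | nil => simp [is_valid_ticket]
  | cons n t ih =>
      simp only [is_valid_ticket, List.mem_cons]
      by_cases h : pvRangeScanA ranges n = true
      · rw [h]
        simp only [Bool.not_true, Bool.false_eq_true, if_false, ih]
        constructor
        · rintro ht m (rfl | hm)
          · exact (pvRangeScanA_iff ranges _).mp h
          · exact ht m hm
        · intro hall m hm
          exact hall m (Or.inr hm)
      · simp only [Bool.not_eq_true] at h
        rw [h]
        simp only [Bool.not_false, if_true, Bool.false_eq_true, false_iff]
        intro hall
        exact absurd ((pvRangeScanA_iff ranges n).mpr (hall n (Or.inl rfl))) (by simp [h])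

theorem foldl_filter_eq (ranges : List (Int × Int)) (rem : List Int) :
    ranges.foldl
      (fun (rem : PySem.Set Int) (r : Int × Int) =>
        rem.filter (fun n => decide (n < r.1) || decide (r.2 < n))) rem
    = rem.filter (fun n => ranges.all (fun r => decide (n < r.1) || decide (r.2 < n))) := by
  induction ranges generalizing rem with
  | nil => simp
  | cons r rs ih =>
      simp only [List.foldl_cons, ih, List.filter_filter, List.all_cons]
      congr 1
      funext n
      rw [Bool.and_comm]

theorem pvAllb_iff (ranges : List (Int × Int)) (n : Int) :
    (ranges.all (fun r => decide (n < r.1) || decide (r.2 < n)) = true)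
      ↔ ∀ r ∈ ranges, n < r.1 ∨ r.2 < n := by
  rw [List.all_eq_true]
  constructor
  · intro h r hr; simpa using h r hr
  · intro h r hr; simpa using h r hr

theorem is_valid_ticket_alt_iff (ranges : List (Int × Int)) (ticket : List Int) :
    is_valid_ticket_alt ranges ticket = true ↔
      ∀ n ∈ ticket, ¬ ∀ r ∈ ranges, n < r.1 ∨ r.2 < n := by
  simp only [is_valid_ticket_alt, foldl_filter_eq, List.isEmpty_iff,
    List.filter_eq_nil_iff, PySem.Set.mem_ofList]
  constructor
  · intro h n hn hall
    exact h n hn ((pvAllb_iff ranges n).mpr hall)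
  · intro h n hn hp
    exact h n hn ((pvAllb_iff ranges n).mp hp)

theorem is_valid_ticket_spec' (ranges : List (Int × Int)) (ticket : List Int) :
    is_valid_ticket ranges ticket = is_valid_ticket_alt ranges ticket := by
  rw [Bool.eq_iff_iff, is_valid_ticket_iff, is_valid_ticket_alt_iff]
  constructor
  · intro h n hn hall
    obtain ⟨r, hr, h1, h2⟩ := h n hn
    rcases hall r hr with h' | h' <;> omega
  · intro h n hn
    by_contra hno
    refine h n hn (fun r hr => ?_)
    by_contra hr2
    have := not_or.mp hr2
    exact hno ⟨r, hr, by omega⟩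

-- ===== VERDICT (by name: the statement is the Claim_ definition above) =====
theorem is_valid_ticket_spec : Claim_equal_is_valid_ticket := by
  intro ranges ticket _
  exact is_valid_ticket_spec' ranges ticket
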